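-- pv_equiv track=rewrite | github.com/ByteSturm/aoc | 2015/08/puzzle_201508.py | calculateLengthOfencodedStringByCounting
-- ===== SOURCE A (Python) =====
-- def calculateLengthOfencodedStringByCounting(input: str):
--     codeLength = len(input)
--     encodedLength = 2
--     for char in input:
--         if char == "\\" or char == '"':
--             encodedLength += 2
--         else:
--             encodedLength += 1
--     return {"code": codeLength, "encoded": encodedLength}
-- ===== SOURCE B (Python) =====
-- def calculateLengthOfencodedStringByCounting(input: str):
--     # materialize the actual encoded representation and measure it
--     encoded = '"' + input.replace("\\", "\\\\").replace('"', '\\"') + '"'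
--     return {"code": len(input), "encoded": len(encoded)}
-- ===== Notes on version B (the rewrite author's own statement) =====
-- stated objective: alternative
-- what changed: Instead of accumulating a per-character length counter, B actually constructs the encoded string (escape backslashes and quotes, wrap in surrounding quotes) and returns its length.
import Mathlib
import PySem

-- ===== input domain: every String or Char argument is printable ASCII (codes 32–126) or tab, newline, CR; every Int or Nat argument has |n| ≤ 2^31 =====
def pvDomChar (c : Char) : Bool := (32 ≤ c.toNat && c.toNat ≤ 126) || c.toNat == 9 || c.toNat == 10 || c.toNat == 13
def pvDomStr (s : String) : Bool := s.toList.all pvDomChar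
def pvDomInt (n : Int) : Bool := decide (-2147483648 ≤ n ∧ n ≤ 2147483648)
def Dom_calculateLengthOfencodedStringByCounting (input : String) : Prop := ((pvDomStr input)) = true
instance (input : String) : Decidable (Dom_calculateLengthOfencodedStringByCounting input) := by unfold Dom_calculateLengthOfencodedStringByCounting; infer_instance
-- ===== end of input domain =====

-- B builds the actual encoded string (escape '\' and '"', wrap in quotes) and returns its length, instead of A's per-character counter loop; objective: alternative.


-- ===== PORT A =====
def calculateLengthOfencodedStringByCounting (input : String) : List (String × Int) :=
  let codeLength : Int := PySem.Str.len input
  let encodedLength : Int :=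
    input.toList.foldl (fun acc ch => if ch == '\\' || ch == '"' then acc + 2 else acc + 1) 2
  [("code", codeLength), ("encoded", encodedLength)]

-- ===== PORT B =====
def calculateLengthOfencodedStringByCounting_alt (input : String) : List (String × Int) :=
  let encoded : String :=
    "\"" ++ PySem.Str.replace (PySem.Str.replace input "\\" "\\\\") "\"" "\\\"" ++ "\""
  [("code", PySem.Str.len input), ("encoded", PySem.Str.len encoded)]

-- ===== PRECONDITION & SPEC =====
def Spec_calculateLengthOfencodedStringByCounting (input : String) (out : List (String × Int)) : Prop := out = calculateLengthOfencodedStringByCounting_alt input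
instance (input : String) (out : List (String × Int)) : Decidable (Spec_calculateLengthOfencodedStringByCounting input out) := by unfold Spec_calculateLengthOfencodedStringByCounting; infer_instance

-- ===== CLAIM (what is proved, stated in full; the proofs are below) =====
def Claim_equal_calculateLengthOfencodedStringByCounting : Prop := ∀ (input : String), Dom_calculateLengthOfencodedStringByCounting input → Spec_calculateLengthOfencodedStringByCounting input (calculateLengthOfencodedStringByCounting input)

-- ===== LEMMAS AND PROOFS =====

-- single-character replacement is character-wise substitution
lemma pvReplaceGoSubst (c : Char) (new : List Char) :
    ∀ (l : List Char) (fuel : Nat) (acc : List Char), l.length ≤ fuel →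
    PySem.Chars.replace.go [c] new fuel l acc
      = acc.reverse ++ l.flatMap (fun x => if x = c then new else [x]) := by
  intro l
  induction l with
  | nil => intro fuel acc _; cases fuel <;> simp [PySem.Chars.replace.go]
  | cons h t ih =>
    intro fuel acc hle
    cases fuel with
    | zero => simp at hle
    | succ f =>
      simp only [PySem.Chars.replace.go]
      by_cases hc : h = c
      · subst hc
        simp [List.isPrefixOf, ih f (new.reverse ++ acc) (by simpa using hle)]
      · have hp : [c].isPrefixOf (h :: t) = false := by
          simp [List.isPrefixOf]; exact fun e => hc e.symm
        simp [hp, hc, ih f (h :: acc) (by simpa using hle)]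

lemma pvReplaceSubst (s : String) (o n : String) (c : Char) (ho : o.toList = [c]) :
    (PySem.Str.replace s o n).toList
      = s.toList.flatMap (fun x => if x = c then n.toList else [x]) := by
  rw [PySem.Str.toList_replace, ho]
  unfold PySem.Chars.replace
  simpa using pvReplaceGoSubst c n.toList s.toList s.toList.length [] le_rfl

-- length of the doubly-substituted list
lemma pvSubstLen : ∀ (cs : List Char),
    ((cs.flatMap (fun x => if x = '\\' then ['\\', '\\'] else [x])).flatMap
        (fun x => if x = '"' then ['\\', '"'] else [x])).length
      = cs.length + cs.count '\\' + cs.count '"' := by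
  intro cs
  induction cs with
  | nil => simp
  | cons h t ih =>
    simp only [List.flatMap_cons, List.flatMap_append, List.length_append, List.count_cons,
      List.length_cons, beq_iff_eq]
    by_cases h1 : h = '\\'
    · subst h1; simp at ih ⊢; omega
    · by_cases h2 : h = '"'
      · subst h2; simp [h1] at ih ⊢; omega
      · simp [h1, h2] at ih ⊢; omega

-- A's accumulation loop in closed form
lemma pvFoldClosed : ∀ (cs : List Char) (a : Int),
    cs.foldl (fun acc ch => if ch == '\\' || ch == '"' then acc + 2 else acc + 1) a
      = a + cs.length + cs.count '\\' + cs.count '"' := by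
  intro cs
  induction cs with
  | nil => intro a; simp
  | cons h t ih =>
    intro a
    rw [List.foldl_cons, ih]
    simp only [List.count_cons, List.length_cons, beq_iff_eq]
    by_cases h1 : h = '\\'
    · subst h1; simp; ring
    · by_cases h2 : h = '"'
      · subst h2; simp [h1]; ring
      · simp [h1, h2]; ring

-- ===== VERDICT (by name: the statement is the Claim_ definition above) =====
theorem calculateLengthOfencodedStringByCounting_spec : Claim_equal_calculateLengthOfencodedStringByCounting := by
  intro input _
  unfold Spec_calculateLengthOfencodedStringByCounting
  unfold calculateLengthOfencodedStringByCounting calculateLengthOfencodedStringByCounting_alt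
  simp only [PySem.Str.len_eq, String.toList_append,
    pvReplaceSubst _ "\"" "\\\"" '"' (by decide),
    pvReplaceSubst _ "\\" "\\\\" '\\' (by decide),
    pvFoldClosed, List.length_append]
  rw [(by decide : "\\\\".toList = ['\\', '\\']), (by decide : "\\\"".toList = ['\\', '"']),
    pvSubstLen, (by decide : "\"".toList = ['"'])]
  simp only [List.cons.injEq, Prod.mk.injEq, and_true, true_and, List.length_cons,
    List.length_nil]
  push_cast
  ring
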